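-- pv_equiv track=rewrite | github.com/chopper6/netDynamics | deep.py | clause_order
-- ===== SOURCE A (Python) =====
-- def clause_order(clause):
--     # order = # base nodes included
--     # for example 'A&B+C+D' is considered 4th order
--     order = 0
--     for ele in clause:
--         parts = ele.split('&')
--         for part in parts:
--             frags = part.split('+')
--             order += len(frags)
--     return order
-- ===== SOURCE B (Python) =====
-- def clause_order(clause):
--     # order = # base nodes included: each element contributes 1 plus one per delimiter
--     order = 0
--     for ele in clause:
--         order += 1
--         for ch in ele:
--             if ch == '&' or ch == '+':
--                 order += 1
--     return order
-- ===== Notes on version B (the rewrite author's own statement) =====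
-- stated objective: simpler
-- what changed: Replaces the nested split('&')/split('+') passes that build intermediate lists with a single character scan per element counting delimiter characters (each element contributes 1 + number of '&'/'+' characters).
import Mathlib
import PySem

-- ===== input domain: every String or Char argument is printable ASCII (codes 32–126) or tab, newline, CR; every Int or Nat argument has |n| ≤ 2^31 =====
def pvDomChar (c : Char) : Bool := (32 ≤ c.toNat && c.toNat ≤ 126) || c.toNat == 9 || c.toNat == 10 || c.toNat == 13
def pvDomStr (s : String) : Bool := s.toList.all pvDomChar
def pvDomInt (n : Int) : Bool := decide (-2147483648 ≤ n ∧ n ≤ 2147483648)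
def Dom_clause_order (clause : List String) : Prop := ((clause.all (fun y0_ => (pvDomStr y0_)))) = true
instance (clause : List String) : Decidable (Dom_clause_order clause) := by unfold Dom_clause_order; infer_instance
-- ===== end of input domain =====

-- B replaces A's nested split('&')/split('+') passes by one character scan per element; objective: simpler.

-- ===== PORT A =====
-- ele.split('&') / part.split('+') with a nonempty separator is PySem.Chars.splitOn on the code points
def clause_order (clause : List String) : Int :=
  clause.foldl (fun order ele =>
    let parts := PySem.Chars.splitOn ele.toList ['&']
    parts.foldl (fun order part =>
      let frags := PySem.Chars.splitOn part ['+']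
      order + (frags.length : Int)) order) 0

-- ===== PORT B =====
def clause_order_alt (clause : List String) : Int :=
  clause.foldl (fun order ele =>
    ele.toList.foldl (fun order ch =>
      if ch == '&' || ch == '+' then order + 1 else order) (order + 1)) 0

-- ===== PRECONDITION & SPEC =====
def Spec_clause_order (clause : List String) (out : Int) : Prop := out = clause_order_alt clause
instance (clause : List String) (out : Int) : Decidable (Spec_clause_order clause out) := by unfold Spec_clause_order; infer_instance

-- ===== CLAIM (what is proved, stated in full; the proofs are below) =====
def Claim_equal_clause_order : Prop := ∀ (clause : List String), Dom_clause_order clause → Spec_clause_order clause (clause_order clause)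

-- ===== LEMMAS AND PROOFS =====

-- structural model of Python's str.split(sep) for a single-character separator
def pvParts (c : Char) : List Char → List Char → List (List Char)
  | [], cur => [cur.reverse]
  | a :: rest, cur =>
      if a = c then cur.reverse :: pvParts c rest [] else pvParts c rest (a :: cur)

theorem pvGo_eq (c : Char) : ∀ (fuel : Nat) (l cur : List Char) (acc : List (List Char)),
    l.length ≤ fuel →
    PySem.Chars.splitOn.go [c] fuel l cur acc = acc.reverse ++ pvParts c l cur := by
  intro fuel
  induction fuel with
  | zero =>
    intro l cur acc h
    have : l = [] := by cases l <;> simp_all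
    subst this
    simp [PySem.Chars.splitOn.go, pvParts]
  | succ n ih =>
    intro l cur acc h
    cases l with
    | nil => simp [PySem.Chars.splitOn.go, pvParts]
    | cons a rest =>
      by_cases hac : a = c
      · subst hac
        simp only [PySem.Chars.splitOn.go, List.isPrefixOf, beq_self_eq_true, Bool.true_and,
          List.length_cons, List.drop_succ_cons, List.length_nil, List.drop_zero]
        rw [ih rest [] (cur.reverse :: acc) (by simpa using Nat.le_of_succ_le_succ h)]
        simp [pvParts]
      · simp only [PySem.Chars.splitOn.go, List.isPrefixOf]
        have hba : (c == a) = false := by simpa using (Ne.symm hac)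
        simp only [hba, Bool.false_and, Bool.false_eq_true, if_false]
        rw [ih rest (a :: cur) acc (by simpa using Nat.le_of_succ_le_succ h)]
        simp [pvParts, hac]

theorem splitOn_single (c : Char) (s : List Char) :
    PySem.Chars.splitOn s [c] = pvParts c s [] := by
  unfold PySem.Chars.splitOn
  rw [pvGo_eq c (s.length + 1) s [] [] (by omega)]
  simp

theorem pvParts_length (c : Char) : ∀ (l cur : List Char),
    (pvParts c l cur).length = l.count c + 1 := by
  intro l
  induction l with
  | nil => intro cur; simp [pvParts]
  | cons a rest ih =>
    intro cur
    by_cases h : a = c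
    · subst h; simp [pvParts, ih]
    · simp [pvParts, h, ih]

theorem pvParts_count (c d : Char) (hdc : d ≠ c) : ∀ (l cur : List Char),
    ((pvParts c l cur).map (fun p => p.count d)).sum = cur.count d + l.count d := by
  intro l
  induction l with
  | nil => intro cur; simp [pvParts]
  | cons a rest ih =>
    intro cur
    by_cases h : a = c
    · subst h
      simp [pvParts, ih, Ne.symm hdc]
    · simp only [pvParts, if_neg h, ih]
      simp [List.count_cons]
      by_cases hda : a = d
      · simp [hda]; omega
      · simp [hda]

-- foldl with '+ f x' is the starting value plus the sum of f over the list
theorem pvFoldl_add_sum (f : List Char → Int) : ∀ (l : List (List Char)) (a : Int),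
    l.foldl (fun acc x => acc + f x) a = a + ((l.map f).sum) := by
  intro l
  induction l with
  | nil => intro a; simp
  | cons x xs ih => intro a; simp [List.foldl_cons, ih]; ring

theorem pvCountP_split (s : List Char) :
    (s.countP (fun ch => ch == '&' || ch == '+') : Int)
      = (s.count '&' : Int) + (s.count '+' : Int) := by
  induction s with
  | nil => simp
  | cons a rest ih =>
    by_cases h1 : a = '&'
    · subst h1; simp [ih]; ring
    · by_cases h2 : a = '+'
      · subst h2; simp [ih]; ring
      · simp [h1, h2, ih]

theorem pvElem_eq (s : List Char) (o : Int) :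
    (PySem.Chars.splitOn s ['&']).foldl (fun order part =>
        order + ((PySem.Chars.splitOn part ['+']).length : Int)) o
      = s.foldl (fun order ch => if ch == '&' || ch == '+' then order + 1 else order) (o + 1) := by
  rw [PySem.List.foldl_if_add_one (fun ch => ch == '&' || ch == '+')]
  rw [pvFoldl_add_sum]
  rw [splitOn_single]
  have hmap : (pvParts '&' s []).map (fun part => ((PySem.Chars.splitOn part ['+']).length : Int))
      = (pvParts '&' s []).map (fun part => ((part.count '+' : Int) + 1)) := by
    apply List.map_congr_left
    intro p _
    rw [splitOn_single, pvParts_length]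
    push_cast
    ring
  rw [hmap]
  have hsum : ((pvParts '&' s []).map (fun part => ((part.count '+' : Int) + 1))).sum
      = ((pvParts '&' s []).map (fun part => (part.count '+' : Int))).sum
        + ((pvParts '&' s []).length : Int) := by
    induction (pvParts '&' s []) with
    | nil => simp
    | cons x xs ih => simp [ih]; ring
  rw [hsum, pvParts_length]
  have hcnt : ((pvParts '&' s []).map (fun part => (part.count '+' : Int))).sum
      = (s.count '+' : Int) := by
    have h2 : ((pvParts '&' s []).map (fun p => p.count '+')).sum = s.count '+' := by
      simpa using pvParts_count '&' '+' (by decide) s []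
    rw [← h2]
    push_cast
    rw [List.map_map]
    rfl
  rw [hcnt, pvCountP_split]
  push_cast; ring

-- ===== VERDICT (by name: the statement is the Claim_ definition above) =====
theorem clause_order_spec : Claim_equal_clause_order := by
  intro clause hdom
  clear hdom
  unfold Spec_clause_order clause_order clause_order_alt
  induction clause using List.reverseRecOn with
  | nil => rfl
  | append_singleton xs x ih =>
    simp only [List.foldl_append, List.foldl_cons, List.foldl_nil]
    rw [ih, pvElem_eq]
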